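-- pv_equiv track=rewrite | github.com/SckyzO/rackscope | src/rackscope/telemetry/planner.py | _chars_to_regex
-- ===== SOURCE A (Python) =====
-- from typing import Dict, List, Iterable, Optional, Tuple
--
-- def _escape_label_value(value: str) -> str:
--     return value.replace("\\", "\\\\").replace('"', '\\"')
--
-- def _chars_to_regex(chars: List[str]) -> str:
--     if len(chars) == 1:
--         return _escape_label_value(chars[0])
--     if all(ch.isdigit() for ch in chars):
--         ranges = _digit_ranges(sorted(set(chars)))
--         if len(ranges) == 1 and ranges[0][0] == ranges[0][1]:
--             return ranges[0][0]
--         parts = []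
--         for start, end in ranges:
--             if start == end:
--                 parts.append(start)
--             else:
--                 parts.append(f"{start}-{end}")
--         return f"[{''.join(parts)}]"
--     escaped = "".join(_escape_label_value(ch) for ch in sorted(set(chars)))
--     return f"[{escaped}]"
--
-- def _digit_ranges(digits: List[str]) -> List[Tuple[str, str]]:
--     ranges: List[Tuple[str, str]] = []
--     start = prev = digits[0]
--     for d in digits[1:]:
--         if ord(d) == ord(prev) + 1:
--             prev = d
--             continue
--         ranges.append((start, prev))
--         start = prev = d
--     ranges.append((start, prev))
--     return ranges
-- ===== SOURCE B (Python) =====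
-- from typing import List
--
--
-- def _escape_label_value(value: str) -> str:
--     return value.replace("\\", "\\\\").replace('"', '\\"')
--
--
-- def _chars_to_regex(chars: List[str]) -> str:
--     if len(chars) == 1:
--         return _escape_label_value(chars[0])
--     uniq = sorted(set(chars))
--     if all(ch.isdigit() for ch in chars):
--         if len(uniq) == 1:
--             # one distinct digit: a single degenerate range, emitted bare
--             return uniq[0]
--         # scan the fixed alphabet '0'..'9' for maximal runs present in uniq
--         parts = []
--         d = 0
--         while d <= 9:
--             if str(d) in uniq:
--                 e = d
--                 while e + 1 <= 9 and str(e + 1) in uniq: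
--                     e += 1
--                 parts.append(str(d) if d == e else f"{d}-{e}")
--                 d = e + 1
--             else:
--                 d += 1
--         return "[" + "".join(parts) + "]"
--     return "[" + "".join(_escape_label_value(ch) for ch in uniq) + "]"
-- ===== Notes on version B (the rewrite author's own statement) =====
-- stated objective: alternative
-- what changed: B builds the digit ranges by scanning the fixed alphabet '0'..'9' for maximal runs present in the deduplicated input (with a direct early return when only one distinct value remains), instead of A's start/prev tracking over the sorted digit list followed by a post-hoc single-degenerate-range special case.
import Mathlib
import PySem

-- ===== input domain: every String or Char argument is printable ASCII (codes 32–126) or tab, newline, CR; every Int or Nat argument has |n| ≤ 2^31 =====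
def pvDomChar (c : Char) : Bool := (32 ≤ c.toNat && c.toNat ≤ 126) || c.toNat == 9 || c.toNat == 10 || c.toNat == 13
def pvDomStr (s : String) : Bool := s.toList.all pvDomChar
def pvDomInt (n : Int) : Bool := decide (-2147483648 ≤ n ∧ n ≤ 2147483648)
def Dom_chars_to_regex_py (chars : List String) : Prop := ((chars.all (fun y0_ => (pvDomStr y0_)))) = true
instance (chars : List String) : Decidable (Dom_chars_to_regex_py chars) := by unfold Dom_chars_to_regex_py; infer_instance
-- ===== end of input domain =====

-- B replaces A's start/prev scan over the sorted digit list by a run scan over the fixed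
-- alphabet '0'..'9' (alternative decomposition, same cost).


-- ===== PORT A =====
def escape_label_value (value : String) : String :=
  PySem.Str.replace (PySem.Str.replace value "\\" "\\\\") "\"" "\\\""

-- sorted(set(chars)) — used verbatim by both Pythons; Python's str order = code-point lex = '<' on .toList
def sortedSet (chars : List String) : List String :=
  PySem.List.sorted (PySem.Set.ofList chars) (fun s => s.toList) false

-- ord(d): exact on the length-1 strings Pre_ admits (Python raises TypeError on others)
def pyOrd (s : String) : Int :=
  match s.toList with
  | [c] => (c.toNat : Int)
  | _ => 0

-- _digit_ranges; the [] case is unreachable (Python raises IndexError there; Pre_ excludes chars = [])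
def digitRanges (digits : List String) : List (String × String) :=
  match digits with
  | [] => []
  | d0 :: rest =>
    let st := rest.foldl
      (fun (acc : List (String × String) × String × String) d =>
        if pyOrd d == pyOrd acc.2.2 + 1 then (acc.1, acc.2.1, d)
        else (acc.1 ++ [(acc.2.1, acc.2.2)], d, d))
      ([], d0, d0)
    st.1 ++ [(st.2.1, st.2.2)]

-- the all-digit branch of A, as a function of sorted(set(chars))
def aDigitBranch (uniq : List String) : String :=
  let ranges := digitRanges uniq
  let r0 := (PySem.List.pyGet? ranges 0).getD ("", "")
  if ranges.length == 1 && (r0.1 == r0.2) then r0.1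
  else
    let parts := ranges.foldl
      (fun (parts : List String) se =>
        if se.1 == se.2 then parts ++ [se.1] else parts ++ [se.1 ++ "-" ++ se.2]) []
    "[" ++ PySem.Str.join "" parts ++ "]"

def chars_to_regex_py (chars : List String) : String :=
  if chars.length == 1 then escape_label_value ((PySem.List.pyGet? chars 0).getD "")
  else if chars.all PySem.Str.strIsdigit then aDigitBranch (sortedSet chars)
  else "[" ++ PySem.Str.join "" ((sortedSet chars).map escape_label_value) ++ "]"

-- ===== PORT B =====
-- inner while: extend the run at e while e+1 <= 9 and str(e+1) is present
-- (fuel-indexed structural recursion; fuel 10 always suffices since e increases each step and stops past 9)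
def bScanExtend (uniq : List String) : Nat → Nat → Nat
  | 0, e => e
  | k + 1, e =>
    if e + 1 ≤ 9 && uniq.contains (PySem.Int.toStr (e + 1)) then bScanExtend uniq k (e + 1)
    else e

-- outer while over d = 0..9, emitting one part per maximal run present (same fuel scheme)
def bScanParts (uniq : List String) : Nat → Nat → List String
  | 0, _ => []
  | k + 1, d =>
    if d ≤ 9 then
      if uniq.contains (PySem.Int.toStr d) then
        let e := bScanExtend uniq 10 d
        (if d = e then PySem.Int.toStr d
         else PySem.Int.toStr d ++ "-" ++ PySem.Int.toStr e) :: bScanParts uniq k (e + 1)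
      else bScanParts uniq k (d + 1)
    else []

-- the all-digit branch of B, as a function of sorted(set(chars))
def bDigitBranch (uniq : List String) : String :=
  if uniq.length == 1 then (PySem.List.pyGet? uniq 0).getD ""
  else "[" ++ PySem.Str.join "" (bScanParts uniq 10 0) ++ "]"

def chars_to_regex_py_alt (chars : List String) : String :=
  if chars.length == 1 then escape_label_value ((PySem.List.pyGet? chars 0).getD "")
  else
    let uniq := sortedSet chars
    if chars.all PySem.Str.strIsdigit then bDigitBranch uniq
    else "[" ++ PySem.Str.join "" (uniq.map escape_label_value) ++ "]"

-- ===== PRECONDITION & SPEC =====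
-- Pre_ excludes exactly the inputs where A raises: the empty list (IndexError on digits[0]) and
-- lists of ≥ 2 distinct all-digit strings containing an entry of length ≠ 1 (TypeError from ord()).
def Pre_chars_to_regex_py (chars : List String) : Prop :=
  chars ≠ [] ∧
  ¬((∀ c ∈ chars, PySem.Str.strIsdigit c = true) ∧
    2 ≤ (PySem.Set.ofList chars).length ∧ ∃ c ∈ chars, c.toList.length ≠ 1)
instance (chars : List String) : Decidable (Pre_chars_to_regex_py chars) := by
  unfold Pre_chars_to_regex_py; infer_instance
def pvWitness_chars_to_regex_py : List String := ["1", "3", "2", "a"]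

def Spec_chars_to_regex_py (chars : List String) (out : String) : Prop := out = chars_to_regex_py_alt chars
instance (chars : List String) (out : String) : Decidable (Spec_chars_to_regex_py chars out) := by unfold Spec_chars_to_regex_py; infer_instance

-- ===== CLAIM (what is proved, stated in full; the proofs are below) =====
def Claim_equal_chars_to_regex_py : Prop := ∀ (chars : List String), Dom_chars_to_regex_py chars → Pre_chars_to_regex_py chars → Spec_chars_to_regex_py chars (chars_to_regex_py chars)

-- ===== LEMMAS AND PROOFS =====
def digitStrs : List String := ["0", "1", "2", "3", "4", "5", "6", "7", "8", "9"]
def dstr (k : Nat) : String := PySem.Int.toStr (k : Int)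

-- Nat-level mirror of B's scan
def natExtend (q : Nat → Bool) : Nat → Nat → Nat
  | 0, e => e
  | k + 1, e => if e + 1 ≤ 9 && q (e + 1) then natExtend q k (e + 1) else e
def natRuns (q : Nat → Bool) : Nat → Nat → List (Nat × Nat)
  | 0, _ => []
  | k + 1, d =>
    if d ≤ 9 then
      if q d then (d, natExtend q 10 d) :: natRuns q k (natExtend q 10 d + 1)
      else natRuns q k (d + 1)
    else []
-- Nat-level mirror of A's _digit_ranges
def natDigitRanges (l : List Nat) : List (Nat × Nat) :=
  match l with
  | [] => []
  | d0 :: rest =>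
    let st := rest.foldl
      (fun (acc : List (Nat × Nat) × Nat × Nat) k =>
        if k = acc.2.2 + 1 then (acc.1, acc.2.1, k)
        else (acc.1 ++ [(acc.2.1, acc.2.2)], k, k))
      ([], d0, d0)
    st.1 ++ [(st.2.1, st.2.2)]
def qOf (nl : List Nat) : Nat → Bool := fun k => decide (k ∈ nl)
-- the finite combinatorial core, checked over all 1024 sublists of range 10
def natChk (nl : List Nat) : Bool :=
  (natDigitRanges nl == natRuns (qOf nl) 10 0) &&
  ((nl.length == 1) == ((natRuns (qOf nl) 10 0).length == 1 && ((natRuns (qOf nl) 10 0).headD (0,1)).1 == ((natRuns (qOf nl) 10 0).headD (0,1)).2)) &&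
  (!(nl.length == 1) || (natRuns (qOf nl) 10 0 == [(nl.headD 0, nl.headD 0)])) &&
  ((natRuns (qOf nl) 10 0).all (fun r => r.1 ≤ 9 && r.2 ≤ 9))
set_option maxRecDepth 100000 in
theorem Fall : ((List.range 10).sublists).all natChk = true := by decide
theorem natChk_of_sublist (nl : List Nat) (h : nl.Sublist (List.range 10)) : natChk nl = true :=
  List.all_eq_true.1 Fall nl (List.mem_sublists.2 h)

theorem pyOrd_dstr (k : Nat) (hk : k ≤ 9) : pyOrd (dstr k) = 48 + k := by
  interval_cases k <;> decide
theorem beq_dstr (a b : Nat) (ha : a ≤ 9) (hb : b ≤ 9) : (dstr a == dstr b) = (a == b) := by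
  interval_cases a <;> interval_cases b <;> decide
theorem dstr_inj (a b : Nat) (ha : a ≤ 9) (hb : b ≤ 9) (h : dstr a = dstr b) : a = b := by
  have := beq_dstr a b ha hb
  rw [h] at this
  simpa using this.symm
theorem mem_map_dstr (nl : List Nat) (hnl : ∀ j ∈ nl, j ≤ 9) (k : Nat) (hk : k ≤ 9) :
    (dstr k ∈ nl.map dstr) ↔ k ∈ nl := by
  constructor
  · rintro h
    rcases List.mem_map.1 h with ⟨j, hj, hjk⟩
    exact (dstr_inj j k (hnl j hj) hk hjk) ▸ hj
  · exact fun h => List.mem_map.2 ⟨k, h, rfl⟩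
theorem contains_map_dstr (nl : List Nat) (hnl : ∀ j ∈ nl, j ≤ 9) (k : Nat) (hk : k ≤ 9) :
    (nl.map dstr).contains (dstr k) = qOf nl k := by
  simp [qOf, mem_map_dstr nl hnl k hk]

theorem ordCond_eq (k pv : Nat) (hk : k ≤ 9) (hpv : pv ≤ 9) :
    (pyOrd (dstr k) == pyOrd (dstr pv) + 1) = (k == pv + 1) := by
  rw [pyOrd_dstr k hk, pyOrd_dstr pv hpv]
  by_cases h : k = pv + 1
  · subst h; simp; ring
  · have : (48 + (k : Int)) ≠ (48 + pv) + 1 := by omega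
    simp [h, this]

theorem go_eq (l : List Nat) :
    ∀ (rs : List (Nat × Nat)) (s pv : Nat), pv ≤ 9 → (∀ j ∈ l, j ≤ 9) →
    (l.map dstr).foldl
      (fun (acc : List (String × String) × String × String) d =>
        if pyOrd d == pyOrd acc.2.2 + 1 then (acc.1, acc.2.1, d)
        else (acc.1 ++ [(acc.2.1, acc.2.2)], d, d))
      (rs.map (fun r => (dstr r.1, dstr r.2)), dstr s, dstr pv)
    = (let st := l.foldl
        (fun (acc : List (Nat × Nat) × Nat × Nat) k =>
          if k = acc.2.2 + 1 then (acc.1, acc.2.1, k)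
          else (acc.1 ++ [(acc.2.1, acc.2.2)], k, k))
        (rs, s, pv)
       ((st.1.map (fun r => (dstr r.1, dstr r.2)) : List (String × String)), dstr st.2.1, dstr st.2.2)) := by
  induction l with
  | nil => intro rs s pv hpv hl; rfl
  | cons k t ih =>
    intro rs s pv hpv hl
    have hk : k ≤ 9 := hl k (List.mem_cons_self ..)
    have ht : ∀ j ∈ t, j ≤ 9 := fun j hj => hl j (List.mem_cons_of_mem _ hj)
    simp only [List.map_cons, List.foldl_cons, ordCond_eq k pv hk hpv]
    by_cases h : k = pv + 1
    · subst h
      simp only [beq_self_eq_true, if_true]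
      exact ih rs s (pv + 1) hk ht
    · have hb : (k == pv + 1) = false := by simpa using h
      simp only [hb, Bool.false_eq_true, if_false, if_neg h]
      rw [show rs.map (fun r => (dstr r.1, dstr r.2)) ++ [(dstr s, dstr pv)]
            = (rs ++ [(s, pv)]).map (fun r => (dstr r.1, dstr r.2)) by simp]
      exact ih (rs ++ [(s, pv)]) k k hk ht

theorem digitRanges_map (l : List Nat) (hl : ∀ j ∈ l, j ≤ 9) :
    digitRanges (l.map dstr) = (natDigitRanges l).map (fun r => (dstr r.1, dstr r.2)) := by
  cases l with
  | nil => rfl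
  | cons k t =>
    have hk : k ≤ 9 := hl k (List.mem_cons_self ..)
    have ht : ∀ j ∈ t, j ≤ 9 := fun j hj => hl j (List.mem_cons_of_mem _ hj)
    simp only [digitRanges, natDigitRanges, List.map_cons]
    have := go_eq t [] k k hk ht
    simp only [List.map_nil] at this
    simp only [this]
    simp
theorem partsA_eq (rs : List (String × String)) (acc : List String) :
    rs.foldl (fun parts se => if se.1 == se.2 then parts ++ [se.1] else parts ++ [se.1 ++ "-" ++ se.2]) acc
      = acc ++ rs.map (fun se => if se.1 == se.2 then se.1 else se.1 ++ "-" ++ se.2) := by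
  induction rs generalizing acc with
  | nil => simp
  | cons r t ih =>
    simp only [List.foldl_cons, List.map_cons]
    cases h : (r.1 == r.2) <;>
      simp only [Bool.false_eq_true, if_false, if_true] <;> rw [ih] <;> simp
theorem bScanExtend_eq (nl : List Nat) (hnl : ∀ j ∈ nl, j ≤ 9) :
    ∀ fuel e, bScanExtend (nl.map dstr) fuel e = natExtend (qOf nl) fuel e := by
  intro fuel
  induction fuel with
  | zero => intro e; rfl
  | succ k ih =>
    intro e
    simp only [bScanExtend, natExtend]
    by_cases h9 : e + 1 ≤ 9
    · have hc : ((e : Int) + 1) = (((e + 1 : Nat)) : Int) := by push_cast; ring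
      rw [hc]
      rw [show PySem.Int.toStr (((e + 1 : Nat)) : Int) = dstr (e + 1) from rfl,
          contains_map_dstr nl hnl (e + 1) h9]
      by_cases hq : qOf nl (e + 1) = true
      · simp [h9, hq, ih]
      · simp at hq
        simp [hq]
    · have h9' : ¬ e < 9 := by omega
      simp [h9']
theorem bScanParts_eq (nl : List Nat) (hnl : ∀ j ∈ nl, j ≤ 9) :
    ∀ fuel d, bScanParts (nl.map dstr) fuel d
      = (natRuns (qOf nl) fuel d).map
          (fun r => if r.1 = r.2 then dstr r.1 else dstr r.1 ++ "-" ++ dstr r.2) := by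
  intro fuel
  induction fuel with
  | zero => intro d; rfl
  | succ k ih =>
    intro d
    simp only [bScanParts, natRuns]
    by_cases h9 : d ≤ 9
    · rw [show PySem.Int.toStr ((d : Nat) : Int) = dstr d from rfl, contains_map_dstr nl hnl d h9]
      by_cases hq : qOf nl d = true
      · simp only [h9, hq, if_true, List.map_cons, ih,
          bScanExtend_eq nl hnl 10 d, dstr]
      · simp only [Bool.not_eq_true] at hq
        simp [h9, hq, ih]
    · simp [h9]

theorem char_digit_mem (ch : Char) (h : '0' ≤ ch) (h2 : ch ≤ '9') :
    ch ∈ ['0','1','2','3','4','5','6','7','8','9'] := by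
  have h1 : 48 ≤ ch.toNat := h
  have h3 : ch.toNat ≤ 57 := h2
  have hofn := Char.ofNat_toNat ch
  have : ch.toNat = 48 ∨ ch.toNat = 49 ∨ ch.toNat = 50 ∨ ch.toNat = 51 ∨ ch.toNat = 52 ∨
      ch.toNat = 53 ∨ ch.toNat = 54 ∨ ch.toNat = 55 ∨ ch.toNat = 56 ∨ ch.toNat = 57 := by omega
  rcases this with h|h|h|h|h|h|h|h|h|h <;> rw [h] at hofn <;> rw [← hofn] <;> simp

theorem mem_digitStrs_of_char (c : String) (ch : Char) (hch : c.toList = [ch])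
    (hmem : ch ∈ ['0','1','2','3','4','5','6','7','8','9']) : c ∈ digitStrs := by
  fin_cases hmem <;>
    [exact (String.toList_inj.1 (hch.trans (by decide)) : c = "0") ▸ (by decide);
     exact (String.toList_inj.1 (hch.trans (by decide)) : c = "1") ▸ (by decide);
     exact (String.toList_inj.1 (hch.trans (by decide)) : c = "2") ▸ (by decide);
     exact (String.toList_inj.1 (hch.trans (by decide)) : c = "3") ▸ (by decide);
     exact (String.toList_inj.1 (hch.trans (by decide)) : c = "4") ▸ (by decide);
     exact (String.toList_inj.1 (hch.trans (by decide)) : c = "5") ▸ (by decide);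
     exact (String.toList_inj.1 (hch.trans (by decide)) : c = "6") ▸ (by decide);
     exact (String.toList_inj.1 (hch.trans (by decide)) : c = "7") ▸ (by decide);
     exact (String.toList_inj.1 (hch.trans (by decide)) : c = "8") ▸ (by decide);
     exact (String.toList_inj.1 (hch.trans (by decide)) : c = "9") ▸ (by decide)]

theorem mem_digitStrs_of_isdigit (c : String) (hd : PySem.Str.strIsdigit c = true)
    (hl : c.toList.length = 1) : c ∈ digitStrs := by
  rcases List.length_eq_one_iff.1 hl with ⟨ch, hch⟩
  rw [PySem.Str.strIsdigit_eq, hch] at hd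
  have hdig : PySem.Chars.isdigit ch = true := by
    simpa [PySem.Chars.strIsdigit] using hd
  have hb : '0' ≤ ch ∧ ch ≤ '9' := by simpa [PySem.Chars.isdigit] using hdig
  exact mem_digitStrs_of_char c ch hch (char_digit_mem ch hb.1 hb.2)

theorem digitStrs_eq_map : digitStrs = (List.range 10).map dstr := by decide

theorem sorted_inst_bridge (xs : List String) :
    PySem.List.sorted xs (fun s : String => s.toList) false
      = @PySem.List.sorted String (List Char) LinearOrder.toPartialOrder.toPreorder.toLT
          LinearOrder.toDecidableLT xs (fun s => s.toList) false := by
  congr 1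

theorem sortedSet_eq_filter (chars : List String)
    (hall : ∀ c ∈ chars, c ∈ digitStrs) :
    sortedSet chars = digitStrs.filter (fun s => decide (s ∈ chars)) := by
  unfold sortedSet
  rw [sorted_inst_bridge]
  apply PySem.List.sorted_eq_of_perm_of_pairwise_lt
  · rw [List.perm_ext_iff_of_nodup
      (List.Nodup.filter _ (by decide : digitStrs.Nodup)) (PySem.Set.nodup_ofList chars)]
    intro a
    simp only [List.mem_filter, decide_eq_true_eq, PySem.Set.mem_ofList]
    exact ⟨fun h => h.2, fun h => ⟨hall a h, h⟩⟩
  · exact List.Pairwise.filter _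
      (by decide : digitStrs.Pairwise (fun a b => a.toList < b.toList))

theorem natChk_split (nl : List Nat) (h : natChk nl = true) :
    natDigitRanges nl = natRuns (qOf nl) 10 0 ∧
    ((nl.length == 1)
      = ((natRuns (qOf nl) 10 0).length == 1 &&
         ((natRuns (qOf nl) 10 0).headD (0,1)).1 == ((natRuns (qOf nl) 10 0).headD (0,1)).2)) ∧
    (nl.length = 1 → natRuns (qOf nl) 10 0 = [(nl.headD 0, nl.headD 0)]) ∧
    (∀ r ∈ natRuns (qOf nl) 10 0, r.1 ≤ 9 ∧ r.2 ≤ 9) := by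
  unfold natChk at h
  simp only [Bool.and_eq_true, beq_iff_eq, Bool.or_eq_true, Bool.not_eq_true', List.all_eq_true,
    Bool.and_eq_true, decide_eq_true_eq] at h
  obtain ⟨⟨⟨h1, h2⟩, h3⟩, h4⟩ := h
  refine ⟨h1, by simpa using h2, ?_, fun r hr => by simpa using h4 r hr⟩
  intro hlen
  rcases h3 with h3 | h3
  · simp [hlen] at h3
  · exact h3

theorem fmt_map_eq (R : List (Nat × Nat)) (h4 : ∀ r ∈ R, r.1 ≤ 9 ∧ r.2 ≤ 9) :
    (R.map (fun r => (dstr r.1, dstr r.2))).map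
        (fun se => if se.1 == se.2 then se.1 else se.1 ++ "-" ++ se.2)
      = R.map (fun r => if r.1 = r.2 then dstr r.1 else dstr r.1 ++ "-" ++ dstr r.2) := by
  rw [List.map_map]
  apply List.map_congr_left
  intro r hr
  obtain ⟨ha, hb⟩ := h4 r hr
  simp only [Function.comp_apply, beq_dstr r.1 r.2 ha hb]
  by_cases h : r.1 = r.2
  · simp [h]
  · simp [h]

theorem digit_branch_eq (nl : List Nat) (hsub : nl.Sublist (List.range 10)) :
    aDigitBranch (nl.map dstr) = bDigitBranch (nl.map dstr) := by
  have hnl : ∀ j ∈ nl, j ≤ 9 := fun j hj => by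
    have := List.mem_range.1 (hsub.subset hj); omega
  obtain ⟨h1, h2, h3, h4⟩ := natChk_split nl (natChk_of_sublist nl hsub)
  simp only [aDigitBranch, bDigitBranch]
  rw [digitRanges_map nl hnl, h1, bScanParts_eq nl hnl 10 0, partsA_eq]
  by_cases hb : nl.length = 1
  · rcases List.length_eq_one_iff.1 hb with ⟨a, ha⟩
    subst ha
    rw [h3 hb]
    simp [PySem.List.pyGet?, PySem.List.pyIdx?]
  · have hbm : ((nl.map dstr).length == 1) = false := by
      simp only [List.length_map]; simpa using hb
    have hnb : (nl.length == 1) = false := by simpa using hb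
    rw [hnb] at h2
    rw [hbm]
    simp only [Bool.false_eq_true, if_false]
    have hmap := fmt_map_eq (natRuns (qOf nl) 10 0) h4
    rcases hR : natRuns (qOf nl) 10 0 with _ | ⟨r, rs⟩
    · simp
    · rw [hR] at h2 h4 hmap
      have hr9 := h4 r (List.mem_cons_self ..)
      have hget : (PySem.List.pyGet? ((r :: rs).map (fun r => (dstr r.1, dstr r.2))) 0).getD ("", "")
          = (dstr r.1, dstr r.2) := by
        simp [PySem.List.pyGet?, PySem.List.pyIdx?]
      rw [hget]
      have hcnd : (((r :: rs).map (fun r => (dstr r.1, dstr r.2))).length == 1 &&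
          (dstr r.1, dstr r.2).1 == (dstr r.1, dstr r.2).2)
          = ((r :: rs).length == 1 && ((r :: rs).headD (0, 1)).1 == ((r :: rs).headD (0, 1)).2) := by
        simp only [List.length_map, List.headD_cons, beq_dstr r.1 r.2 hr9.1 hr9.2]
      rw [hcnd, ← h2]
      simp only [Bool.false_eq_true, if_false, List.nil_append]
      rw [hmap]

-- both digit branches return the bare element on a singleton
theorem branch_singleton (x : String) : aDigitBranch [x] = x ∧ bDigitBranch [x] = x := by
  constructor
  · simp [aDigitBranch, digitRanges, PySem.List.pyGet?, PySem.List.pyIdx?]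
  · simp [bDigitBranch, PySem.List.pyGet?, PySem.List.pyIdx?]

theorem branch_eq_of_digits (chars : List String) (hne : chars ≠ [])
    (hnr : ¬((∀ c ∈ chars, PySem.Str.strIsdigit c = true) ∧
      2 ≤ (PySem.Set.ofList chars).length ∧ ∃ c ∈ chars, c.toList.length ≠ 1))
    (hd : chars.all PySem.Str.strIsdigit = true) :
    aDigitBranch (sortedSet chars) = bDigitBranch (sortedSet chars) := by
  have halldig : ∀ c ∈ chars, PySem.Str.strIsdigit c = true := by
    simpa [List.all_eq_true] using hd
  have hlen : (sortedSet chars).length = (PySem.Set.ofList chars).length :=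
    (PySem.List.sorted_perm _ _ _).length_eq
  rcases hl2 : (sortedSet chars).length with _ | n
  · exfalso
    have hnil : sortedSet chars = [] := List.length_eq_zero_iff.1 hl2
    have : PySem.Set.ofList chars = [] := (PySem.List.sorted_eq_nil_iff _ _ _).1 hnil
    rcases chars with _ | ⟨c, cs⟩
    · exact hne rfl
    · exact List.ne_nil_of_mem (PySem.Set.mem_ofList (c :: cs) c |>.2 (List.mem_cons_self ..)) this
  rcases n with _ | n
  · rcases List.length_eq_one_iff.1 hl2 with ⟨x, hx⟩
    rw [hx]
    exact (branch_singleton x).1.trans (branch_singleton x).2.symm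
  · have hset2 : 2 ≤ (PySem.Set.ofList chars).length := by omega
    have hall1 : ∀ c ∈ chars, c.toList.length = 1 := by
      by_contra hc
      push Not at hc
      exact hnr ⟨halldig, hset2, hc⟩
    have hmem : ∀ c ∈ chars, c ∈ digitStrs := fun c hc =>
      mem_digitStrs_of_isdigit c (halldig c hc) (hall1 c hc)
    have hfil : sortedSet chars = ((List.range 10).filter (fun k => decide (dstr k ∈ chars))).map dstr := by
      rw [sortedSet_eq_filter chars hmem, digitStrs_eq_map, List.filter_map]
      rfl
    rw [hfil]
    exact digit_branch_eq _ List.filter_sublist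

-- ===== VERDICT (by name: the statement is the Claim_ definition above) =====
theorem chars_to_regex_py_spec : Claim_equal_chars_to_regex_py := by
  intro chars hdom hpre
  obtain ⟨hne, hnr⟩ := hpre
  unfold Spec_chars_to_regex_py chars_to_regex_py chars_to_regex_py_alt
  by_cases h1 : (chars.length == 1) = true
  · simp only [h1, if_true]
  · simp only [h1, Bool.false_eq_true, if_false]
    cases hd : chars.all PySem.Str.strIsdigit
    · simp only [Bool.false_eq_true, if_false]
    · simp only [if_true]
      exact branch_eq_of_digits chars hne hnr hd
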